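-- pv_equiv track=rewrite | github.com/uAlek1/Labs | KMZI/rsa_attack/attack2.py | Wiener_attack
-- ===== SOURCE A (Python) =====
-- from math import log2, gcd, sqrt
--
-- def cf_expansion(nm: int, dn:int, l:int) -> list:
--     cf = []
--     a, r = nm // dn, nm % dn
--     cf.append(a)
--     i = 0
--     while r != 0 and i < l:
--         nm, dn = dn, r
--         a = nm // dn
--         r = nm % dn
--         cf.append(a)
--         i+=1
--     return cf
--
-- def Wiener_attack(n:int, e:int)->int:
--     l = int(log2(n))
--     x = cf_expansion(e, n, l)
--     qq, pp, q, p = 0, 1, 1, 0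
--     mes = pow(11, e, n)
--     for i in range(1, len(x)):
--         qq, pp, q, p = q, p, q * x[i] + qq, p * x[i] + pp
--         if(pow(mes, q, n) == 11):
--             return q
--
--     return -1
-- ===== SOURCE B (Python) =====
-- from math import log2
--
-- def Wiener_attack(n: int, e: int) -> int:
--     # Extended Euclidean algorithm on (e, n): the Bezout coefficient of e at step k
--     # is +/- the k-th convergent denominator of e/n, so |s| enumerates exactly the
--     # candidate private exponents; no coefficient list, no convergent recurrence,
--     # and the numerator sequence is never computed.
--     l = int(log2(n))
--     mes = pow(11, e, n)
--     old_r, r = e, n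
--     old_s, s = 1, 0
--     # first division step (its Bezout coefficient belongs to the a0-convergent,
--     # which is not a candidate)
--     a = old_r // r
--     old_r, r = r, old_r - a * r
--     old_s, s = s, old_s - a * s
--     for _ in range(l):
--         if r == 0:
--             break
--         a = old_r // r
--         old_r, r = r, old_r - a * r
--         old_s, s = s, old_s - a * s
--         q = -s if s < 0 else s
--         if pow(mes, q, n) == 11:
--             return q
--     return -1
-- ===== Notes on version B (the rewrite author's own statement) =====
-- stated objective: alternative
-- what changed: B replaces A's two-stage continued-fraction method (build the coefficient list, then run the p/q convergent recurrence over it) by the extended Euclidean algorithm on (e, n): each step tests the absolute value of the Bezout coefficient of e, which equals the convergent denominator, so no coefficient list, no convergent recurrence and no numerator sequence are computed.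
import Mathlib
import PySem

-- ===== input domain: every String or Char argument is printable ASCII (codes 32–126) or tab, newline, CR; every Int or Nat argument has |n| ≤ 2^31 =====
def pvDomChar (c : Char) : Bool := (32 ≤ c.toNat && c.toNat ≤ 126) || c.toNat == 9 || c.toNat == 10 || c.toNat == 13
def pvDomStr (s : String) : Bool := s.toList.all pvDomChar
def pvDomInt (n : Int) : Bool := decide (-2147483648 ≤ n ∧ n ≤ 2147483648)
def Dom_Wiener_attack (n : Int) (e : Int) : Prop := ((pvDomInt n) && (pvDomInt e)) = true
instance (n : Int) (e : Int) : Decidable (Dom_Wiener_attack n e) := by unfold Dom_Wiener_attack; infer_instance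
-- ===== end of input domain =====

-- B replaces A's continued-fraction machinery (coefficient list + convergent recurrence over
-- numerator/denominator pairs) by the extended Euclidean algorithm on (e, n), testing the
-- absolute value of the Bezout coefficient of e (objective: alternative).

-- Python's built-in 3-arg pow, ported by hand as square-and-multiply (CPython's algorithm);
-- exact for m ≥ 1 (PySem.Int.powMod computes the same value but by iterated multiplication,
-- which cannot be evaluated on the admitted 2^31-sized exponents).
def pyPowMod (b : Int) (k : Nat) (m : Int) : Int :=
  if hk : k = 0 then PySem.Int.mod 1 m
  else
    let h := pyPowMod b (k / 2) m
    let h2 := PySem.Int.mod (h * h) m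
    if k % 2 = 1 then PySem.Int.mod (h2 * b) m else h2
termination_by k
decreasing_by exact Nat.div_lt_self (Nat.pos_of_ne_zero hk) one_lt_two

-- Python's built-in pow(11, e, n), used by both sources; exact for n ≥ 1 when 0 ≤ e or ¬(11 ∣ n):
-- for e < 0 CPython raises unless gcd(11,n) = 1 and otherwise exponentiates the modular inverse,
-- which Bezout (Nat.gcdA) produces after reduction mod n.
def pyPow11 (e n : Int) : Int :=
  if 0 ≤ e then pyPowMod 11 e.toNat n
  else pyPowMod (PySem.Int.mod (Nat.gcdA 11 n.toNat) n) (-e).toNat n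

-- ===== PORT A =====
-- while r != 0 and i < l: nm, dn = dn, r; a = nm // dn; r = nm % dn; cf.append(a)
def cfRest (dn r : Int) (fuel : Nat) : List Int :=
  match fuel with
  | 0 => []
  | f + 1 =>
    if r = 0 then []
    else
      let a := PySem.Int.floordiv dn r
      let r' := PySem.Int.mod dn r
      a :: cfRest r r' f

def cfExpansion (nm dn : Int) (l : Nat) : List Int :=
  (PySem.Int.floordiv nm dn) :: cfRest dn (PySem.Int.mod nm dn) l

-- for i in range(1, len(x)): consume x[1:] in order, with A's early return
def attackLoop (mes n : Int) (xs : List Int) (qq pp q p : Int) : Int :=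
  match xs with
  | [] => -1
  | a :: rest =>
    let q' := q * a + qq
    let p' := p * a + pp
    if pyPowMod mes q'.toNat n = 11 then q'
    else attackLoop mes n rest q p q' p'

def Wiener_attack (n : Int) (e : Int) : Int :=
  -- int(log2(n)) = bitLength n - 1: exact for 1 ≤ n ≤ 2^31 (a double log2 cannot cross an integer there)
  let l := PySem.Int.bitLength n - 1
  let x := cfExpansion e n l
  let mes := pyPow11 e n
  attackLoop mes n (x.drop 1) 0 1 1 0

-- ===== PORT B =====
-- for _ in range(l): if r == 0: break; a = old_r//r; (old_r,r) = (r, old_r-a*r);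
--                    (old_s,s) = (s, old_s-a*s); q = -s if s < 0 else s; test q
def extLoop (mes n oldr r olds s : Int) (fuel : Nat) : Int :=
  match fuel with
  | 0 => -1
  | f + 1 =>
    if r = 0 then -1
    else
      let a := PySem.Int.floordiv oldr r
      let oldr' := r
      let r' := oldr - a * r
      let olds' := s
      let s' := olds - a * s
      let q := if s' < 0 then -s' else s'
      if pyPowMod mes q.toNat n = 11 then q
      else extLoop mes n oldr' r' olds' s' f

def Wiener_attack_alt (n : Int) (e : Int) : Int :=
  let l := PySem.Int.bitLength n - 1   -- int(log2(n)), exact for 1 ≤ n ≤ 2^31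
  let mes := pyPow11 e n
  -- first division step of the extended Euclid on (e, n), not tested
  let a := PySem.Int.floordiv e n
  extLoop mes n n (e - a * n) 0 1 l

-- ===== PRECONDITION & SPEC =====
-- A raises outside Pre_: math.log2 raises ValueError for n ≤ 0, and pow(11, e, n) raises
-- ValueError for e < 0 when 11 is not invertible mod n (11 prime: exactly when 11 ∣ n).
def Pre_Wiener_attack (n : Int) (e : Int) : Prop := 1 ≤ n ∧ (0 ≤ e ∨ ¬ (11 ∣ n))
instance (n : Int) (e : Int) : Decidable (Pre_Wiener_attack n e) := by
  unfold Pre_Wiener_attack; infer_instance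

def pvWitness_Wiener_attack : Int × Int := (17, 7)

def Spec_Wiener_attack (n : Int) (e : Int) (out : Int) : Prop := out = Wiener_attack_alt n e
instance (n : Int) (e : Int) (out : Int) : Decidable (Spec_Wiener_attack n e out) := by
  unfold Spec_Wiener_attack; infer_instance

-- ===== CLAIM =====
def Claim_equal_Wiener_attack : Prop := ∀ (n : Int) (e : Int), Dom_Wiener_attack n e → Pre_Wiener_attack n e → Spec_Wiener_attack n e (Wiener_attack n e)

-- ===== LEMMAS AND PROOFS =====
-- Invariant tying B's extended-Euclid state to A's convergent state: the Bezout
-- coefficient s is (±) A's current denominator q and old_s is (∓) the previous one qq,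
-- with alternating signs; A's numerator state (pp, p) never influences the result.
theorem extLoop_eq_attackLoop (mes n : Int) (fuel : Nat) :
    ∀ (dn r qq q olds s pp p : Int), 0 ≤ r → r < dn → 0 ≤ qq → 1 ≤ q →
      ((olds = qq ∧ s = -q) ∨ (olds = -qq ∧ s = q)) →
      extLoop mes n dn r olds s fuel = attackLoop mes n (cfRest dn r fuel) qq pp q p := by
  induction fuel with
  | zero => intro dn r qq q olds s pp p _ _ _ _ _; simp [extLoop, cfRest, attackLoop]
  | succ f ih =>
    intro dn r qq q olds s pp p hr0 hrdn hqq hq hcase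
    by_cases hr : r = 0
    · simp [extLoop, cfRest, attackLoop, hr]
    · have hrpos : 0 < r := lt_of_le_of_ne hr0 (Ne.symm hr)
      have ha : 1 ≤ PySem.Int.floordiv dn r := by
        rw [PySem.Int.le_floordiv_iff_mul_le hrpos]; omega
      have hmodeq : PySem.Int.mod dn r = dn - PySem.Int.floordiv dn r * r := by
        have := PySem.Int.floordiv_mul_add_mod dn r; omega
      have hq' : 1 ≤ q * PySem.Int.floordiv dn r + qq := by nlinarith
      have hs' : olds - PySem.Int.floordiv dn r * s =
          (if olds = qq ∧ s = -q then 1 else -1) * (q * PySem.Int.floordiv dn r + qq) := by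
        rcases hcase with ⟨h1, h2⟩ | ⟨h1, h2⟩
        · rw [if_pos (show olds = qq ∧ s = -q from ⟨h1, h2⟩)]; subst h1 h2; ring
        · rw [if_neg]
          · subst h1 h2; ring
          · rintro ⟨h1', h2'⟩; omega
      simp only [extLoop, cfRest, attackLoop, if_neg hr]
      have hqval : (if olds - PySem.Int.floordiv dn r * s < 0
            then -(olds - PySem.Int.floordiv dn r * s)
            else olds - PySem.Int.floordiv dn r * s) = q * PySem.Int.floordiv dn r + qq := by
        rw [hs']; split_ifs with hcond hneg hneg <;> nlinarith [hq']
      rw [hqval]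
      split
      · rfl
      · rw [hmodeq]
        apply ih
        · rw [← hmodeq]; exact PySem.Int.mod_nonneg dn hrpos
        · rw [← hmodeq]; exact PySem.Int.mod_lt dn hrpos
        · omega
        · exact hq'
        · rcases hcase with ⟨h1, h2⟩ | ⟨h1, h2⟩
          · right; subst h1 h2
            constructor
            · ring
            · rw [hs', if_pos ⟨rfl, rfl⟩]; ring
          · left; subst h1 h2
            constructor
            · rfl
            · rw [hs', if_neg (by rintro ⟨h1', h2'⟩; omega)]; ring

-- ===== VERDICT =====
theorem Wiener_attack_spec : Claim_equal_Wiener_attack := by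
  intro n e _ hpre
  have hn : 0 < n := hpre.1
  unfold Spec_Wiener_attack Wiener_attack Wiener_attack_alt cfExpansion
  simp only [List.drop_succ_cons, List.drop_zero]
  have hinit : e - PySem.Int.floordiv e n * n = PySem.Int.mod e n := by
    have := PySem.Int.floordiv_mul_add_mod e n; omega
  rw [hinit]
  exact (extLoop_eq_attackLoop _ _ _ _ _ 0 1 0 1 _ _
    (PySem.Int.mod_nonneg e hn) (PySem.Int.mod_lt e hn) le_rfl le_rfl
    (Or.inr ⟨by ring, rfl⟩)).symm
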